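-- pv_equiv track=rewrite | github.com/sudoDeVinci/TV-head | tvlib/padder.py | _find_digit_bound
-- ===== SOURCE A (Python) =====
-- def _find_digit_bound(filename: str) -> tuple[bool, int] | tuple[bool, None]:
--     """
--     Find the ending digit of a filename.
--     If found, return true and the number.
--     """
--     #filename = filename[:-4]
--     for i in range(1, len(filename)):
--         i = 0-i
--         if filename[i].isdigit():
--             continue
--         else:
--             return (True, i)
--
--     return (False, None)
-- ===== SOURCE B (Python) =====
-- def _find_digit_bound(filename: str) -> "tuple[bool, int] | tuple[bool, None]":
--     """
--     Find the ending digit of a filename.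
--     If found, return true and the number.
--     """
--     stripped = filename.rstrip("0123456789")
--     if stripped:
--         return (True, len(stripped) - 1 - len(filename))
--     return (False, None)
-- ===== Notes on version B (the rewrite author's own statement) =====
-- stated objective: idiomatic
-- what changed: Replaces the explicit backward index loop with early return by a single rstrip of the trailing digit run plus closed-form index arithmetic.
-- intended difference: On strings whose every character except the first is a digit (including single non-digit characters), A's loop never examines index 0 and falls through to (False, None); B returns (True, -len(filename)), the position where the trailing digits end, which is the function's stated purpose. — e.g. on _find_digit_bound("a1"): A returns (false, none), B returns (true, some (-2))
import Mathlib
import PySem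

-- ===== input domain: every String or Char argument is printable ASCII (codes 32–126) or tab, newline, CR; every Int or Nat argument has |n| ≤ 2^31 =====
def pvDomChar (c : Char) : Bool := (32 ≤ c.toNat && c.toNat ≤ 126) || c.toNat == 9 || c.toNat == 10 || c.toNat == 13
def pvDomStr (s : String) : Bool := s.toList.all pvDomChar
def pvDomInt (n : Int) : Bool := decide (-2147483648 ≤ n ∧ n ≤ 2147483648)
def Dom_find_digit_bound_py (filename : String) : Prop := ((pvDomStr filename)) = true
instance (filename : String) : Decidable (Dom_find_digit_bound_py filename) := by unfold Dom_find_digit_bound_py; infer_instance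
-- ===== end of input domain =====

-- B replaces A's backward index loop (with early return) by one rstrip of the trailing digit
-- run plus closed-form index arithmetic; on strings whose every character after the first is a
-- digit, A never examines index 0 and returns (False, None), while B returns the boundary.


-- ===== PORT A =====
-- the 'for i in range(1, len(filename))' loop with its early return
def pvLoopA (filename : String) : List Int → Bool × Option Int
  | [] => (false, none)
  | i :: rest =>
      let i' : Int := 0 - i
      match PySem.Str.pyGet? filename i' with
      | some c =>
          if PySem.Chars.strIsdigit [c] then pvLoopA filename rest
          else (true, some i')
      | none => (false, none)   -- IndexError; unreachable: every index from range(1, len) is in range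

def find_digit_bound_py (filename : String) : Bool × Option Int :=
  pvLoopA filename (PySem.List.pyRange 1 (PySem.Str.len filename) 1)

-- ===== PORT B =====
def pvDigits : String := "0123456789"

def find_digit_bound_py_alt (filename : String) : Bool × Option Int :=
  -- hand port of filename.rstrip("0123456789") (exact: drops the maximal trailing run of these chars)
  let stripped : List Char :=
    (filename.toList.reverse.dropWhile (fun c => pvDigits.toList.contains c)).reverse
  if stripped = [] then (false, none)
  else (true, some ((stripped.length : Int) - 1 - (filename.toList.length : Int)))

-- ===== PRECONDITION & SPEC =====
-- On strings whose every character except the first is a digit, A returns (False, None) because its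
-- loop never examines index 0; B returns (True, -len(filename)), the intended trailing-digit boundary.
def D_find_digit_bound_py (filename : String) : Prop :=
  filename.toList ≠ [] ∧
  PySem.Chars.isdigit filename.toList.headI = false ∧
  filename.toList.tail.all (fun c => PySem.Chars.isdigit c) = true

instance (filename : String) : Decidable (D_find_digit_bound_py filename) := by
  unfold D_find_digit_bound_py; infer_instance

def Spec_find_digit_bound_py (filename : String) (out : Bool × Option Int) : Prop :=
  ¬ D_find_digit_bound_py filename → out = find_digit_bound_py_alt filename
instance (filename : String) (out : Bool × Option Int) : Decidable (Spec_find_digit_bound_py filename out) := by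
  unfold Spec_find_digit_bound_py; infer_instance

def pvDiffWitness_find_digit_bound_py : String := "a1"
def pvDiffWitnessOut_find_digit_bound_py : (Bool × Option Int) × (Bool × Option Int) :=
  ((false, none), (true, some (-2)))

-- ===== CLAIM (what is proved, stated in full; the proofs are below) =====
def Claim_unchanged_find_digit_bound_py : Prop := ∀ (filename : String), Dom_find_digit_bound_py filename → Spec_find_digit_bound_py filename (find_digit_bound_py filename)
def Claim_changed_find_digit_bound_py : Prop := Dom_find_digit_bound_py (pvDiffWitness_find_digit_bound_py) ∧ D_find_digit_bound_py (pvDiffWitness_find_digit_bound_py) ∧ find_digit_bound_py (pvDiffWitness_find_digit_bound_py) = pvDiffWitnessOut_find_digit_bound_py.1 ∧ find_digit_bound_py_alt (pvDiffWitness_find_digit_bound_py) = pvDiffWitnessOut_find_digit_bound_py.2 ∧ pvDiffWitnessOut_find_digit_bound_py.1 ≠ pvDiffWitnessOut_find_digit_bound_py.2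
def Claim_exact_find_digit_bound_py : Prop := ∀ (filename : String), Dom_find_digit_bound_py filename → D_find_digit_bound_py filename → find_digit_bound_py filename ≠ find_digit_bound_py_alt filename

-- ===== LEMMAS AND PROOFS =====

theorem pv_contains_eq_isdigit (c : Char) :
    pvDigits.toList.contains c = PySem.Chars.isdigit c := by
  have h : pvDigits.toList = ['0','1','2','3','4','5','6','7','8','9'] := by rfl
  rw [h, Bool.eq_iff_iff, List.contains_iff_mem]
  simp only [List.mem_cons, List.not_mem_nil, or_false, PySem.Chars.isdigit,
    Bool.and_eq_true, decide_eq_true_eq, Char.le_def, Char.ext_iff, ← UInt32.toNat_inj]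
  have e0 : ('0':Char).val.toNat = 48 := by decide
  have e1 : ('1':Char).val.toNat = 49 := by decide
  have e2 : ('2':Char).val.toNat = 50 := by decide
  have e3 : ('3':Char).val.toNat = 51 := by decide
  have e4 : ('4':Char).val.toNat = 52 := by decide
  have e5 : ('5':Char).val.toNat = 53 := by decide
  have e6 : ('6':Char).val.toNat = 54 := by decide
  have e7 : ('7':Char).val.toNat = 55 := by decide
  have e8 : ('8':Char).val.toNat = 56 := by decide
  have e9 : ('9':Char).val.toNat = 57 := by decide
  simp only [UInt32.le_iff_toNat_le]
  omega

theorem pv_strIsdigit_singleton (c : Char) :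
    PySem.Chars.strIsdigit [c] = PySem.Chars.isdigit c := by
  simp [PySem.Chars.strIsdigit]

-- A's loop after index resolution: a backward scan of the reversed tail with current index i
def pvScan : List Char → Int → Bool × Option Int
  | [], _ => (false, none)
  | c :: t, i => if PySem.Chars.isdigit c then pvScan t (i + 1) else (true, some (-i))

theorem pvLoopA_eq_scan (filename : String) (c0 : Char) (t : List Char)
    (h : filename.toList = c0 :: t) :
    ∀ (m j : Nat), j + m = t.length →
      pvLoopA filename (PySem.List.pyRange ((j : Int) + 1) ((t.length : Int) + 1) 1)
        = pvScan (t.reverse.drop j) ((j : Int) + 1) := by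
  intro m
  induction m with
  | zero =>
    intro j hj
    rw [PySem.List.pyRange_one_eq_nil (by omega)]
    rw [List.drop_of_length_le (by simp; omega)]
    rfl
  | succ m ih =>
    intro j hj
    have hjlt : j < t.length := by omega
    rw [PySem.List.pyRange_one_cons (by omega)]
    have hget : PySem.Str.pyGet? filename (0 - ((j : Int) + 1)) = some t[t.length - 1 - j] := by
      have h1 : (0 : Int) - ((j : Int) + 1) = -(((j + 1 : Nat) : Int)) := by push_cast; ring
      rw [PySem.Str.pyGet?_eq, PySem.Chars.pyGet?_eq_listPyGet?, h, h1,
        PySem.List.pyGet?_neg_natCast _ (j+1) (by omega) (by simp; omega)]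
      have h2 : (c0 :: t).length - (j + 1) = (t.length - 1 - j) + 1 := by simp; omega
      rw [h2, List.getElem?_cons_succ, List.getElem?_eq_getElem (by omega)]
    have hdrop : t.reverse.drop j = t[t.length - 1 - j] :: t.reverse.drop (j + 1) := by
      rw [List.drop_eq_getElem_cons (by simpa using hjlt)]
      congr 1
      rw [List.getElem_reverse]
    rw [hdrop]
    show (match PySem.Str.pyGet? filename (0 - ((j : Int) + 1)) with
      | some c => if PySem.Chars.strIsdigit [c] then pvLoopA filename (PySem.List.pyRange ((j:Int)+1+1) ((t.length : Int) + 1) 1)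
          else (true, some (0 - ((j:Int)+1)))
      | none => (false, none)) = _
    rw [hget]
    simp only [pv_strIsdigit_singleton]
    rw [pvScan]
    by_cases hd : PySem.Chars.isdigit t[t.length - 1 - j] = true
    · rw [if_pos hd, if_pos hd]
      have := ih (j+1) (by omega)
      push_cast at this
      exact this
    · rw [if_neg hd, if_neg hd]
      norm_num

theorem pvScan_eq (r : List Char) : ∀ i : Int,
    pvScan r i =
      (if (r.dropWhile PySem.Chars.isdigit) = [] then (false, none)
       else (true, some (-(i + ((r.length - (r.dropWhile PySem.Chars.isdigit).length : Nat) : Int))))) := by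
  induction r with
  | nil => intro i; simp [pvScan]
  | cons c t ih =>
    intro i
    by_cases hc : PySem.Chars.isdigit c = true
    · rw [pvScan, if_pos hc, ih (i+1), List.dropWhile_cons_of_pos hc]
      split_ifs with h
      · rfl
      · congr 2
        simp only [List.length_cons]
        have hle := List.length_dropWhile_le PySem.Chars.isdigit t
        omega
    · rw [pvScan, if_neg hc, List.dropWhile_cons_of_neg hc]
      simp

-- A's value on a nonempty string, in closed form
theorem pvA_char (filename : String) (c0 : Char) (t : List Char) (h : filename.toList = c0 :: t) :
    find_digit_bound_py filename =
      (if (t.reverse.dropWhile PySem.Chars.isdigit) = [] then (false, none)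
       else (true, some (-(1 + ((t.length - (t.reverse.dropWhile PySem.Chars.isdigit).length : Nat) : Int))))) := by
  have hlen : PySem.Str.len filename = (t.length : Int) + 1 := by
    simp [h]
  have h1 := pvLoopA_eq_scan filename c0 t h t.length 0 (by omega)
  norm_num at h1
  rw [find_digit_bound_py, hlen, h1, pvScan_eq]
  simp

-- B's value on a nonempty string, in closed form
theorem pvB_char (filename : String) (c0 : Char) (t : List Char) (h : filename.toList = c0 :: t) :
    find_digit_bound_py_alt filename =
      (if (t.reverse ++ [c0]).dropWhile PySem.Chars.isdigit = [] then (false, none)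
       else (true, some ((((t.reverse ++ [c0]).dropWhile PySem.Chars.isdigit).length : Int) - 1 - ((t.length : Int) + 1)))) := by
  rw [find_digit_bound_py_alt, h]
  simp only [pv_contains_eq_isdigit, List.reverse_cons, List.length_cons,
    List.reverse_eq_nil_iff, List.length_reverse]
  split_ifs with h1 <;> simp_all

theorem pv_main (filename : String) (hnD : ¬ D_find_digit_bound_py filename) :
    find_digit_bound_py filename = find_digit_bound_py_alt filename := by
  cases hcs : filename.toList with
  | nil =>
    have hlen : PySem.Str.len filename = 0 := by simp [hcs]
    rw [find_digit_bound_py, hlen, PySem.List.pyRange_one_eq_nil (by norm_num),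
      find_digit_bound_py_alt, hcs]
    rfl
  | cons c0 t =>
    rw [pvA_char filename c0 t hcs, pvB_char filename c0 t hcs]
    by_cases hdp : (t.reverse.dropWhile PySem.Chars.isdigit) = []
    · rw [if_pos hdp]
      by_cases hc0 : PySem.Chars.isdigit c0 = true
      · have hd : (t.reverse ++ [c0]).dropWhile PySem.Chars.isdigit = [] := by
          rw [List.dropWhile_append]
          simp [hdp, List.dropWhile_cons_of_pos hc0]
        rw [hd, if_pos rfl]
      · exfalso
        apply hnD
        refine ⟨by rw [hcs]; simp, by rw [hcs]; simpa using (Bool.not_eq_true _).mp hc0, ?_⟩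
        rw [hcs]
        simp only [List.tail_cons, List.all_eq_true]
        intro c hc
        exact List.dropWhile_eq_nil_iff.mp hdp c (by simpa using hc)
    · have hd : (t.reverse ++ [c0]).dropWhile PySem.Chars.isdigit
          = t.reverse.dropWhile PySem.Chars.isdigit ++ [c0] := by
        rw [List.dropWhile_append]
        simp [List.isEmpty_iff, hdp]
      rw [if_neg hdp, hd, if_neg (by simp)]
      have hle := List.length_dropWhile_le PySem.Chars.isdigit t.reverse
      simp only [List.length_reverse] at hle
      congr 2
      simp only [List.length_append, List.length_cons, List.length_nil]
      push_cast
      omega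

theorem pv_tight (filename : String) (hD : D_find_digit_bound_py filename) :
    find_digit_bound_py filename ≠ find_digit_bound_py_alt filename := by
  obtain ⟨hne, hhead, htail⟩ := hD
  cases hcs : filename.toList with
  | nil => exact absurd hcs hne
  | cons c0 t =>
    have hdp : (t.reverse.dropWhile PySem.Chars.isdigit) = [] := by
      rw [List.dropWhile_eq_nil_iff]
      intro c hc
      rw [hcs] at htail
      simp only [List.tail_cons, List.all_eq_true] at htail
      exact htail c (by simpa using hc)
    have hc0 : PySem.Chars.isdigit c0 = false := by rw [hcs] at hhead; simpa using hhead
    rw [pvA_char filename c0 t hcs, pvB_char filename c0 t hcs, if_pos hdp]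
    have hstep : List.dropWhile PySem.Chars.isdigit [c0] = [c0] := by
      rw [List.dropWhile_cons_of_neg (by simp [hc0])]
    have hd : (t.reverse ++ [c0]).dropWhile PySem.Chars.isdigit = [c0] := by
      rw [List.dropWhile_append]
      simp [hdp, hstep]
    rw [hd, if_neg (by simp)]
    intro heq
    exact absurd (congrArg Prod.fst heq) (by simp)

-- ===== VERDICT (by name: the statement is the Claim_ definition above) =====
theorem find_digit_bound_py_spec : Claim_unchanged_find_digit_bound_py := by
  intro filename _ hnD
  exact pv_main filename hnD

set_option maxRecDepth 20000 in
theorem find_digit_bound_py_changed : Claim_changed_find_digit_bound_py := by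
  unfold Claim_changed_find_digit_bound_py
  refine ⟨by decide, by decide, by rfl, by rfl, by decide⟩

theorem find_digit_bound_py_tight : Claim_exact_find_digit_bound_py := by
  intro filename _ hD
  exact pv_tight filename hD
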